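-- pv_equiv track=rewrite | github.com/Evindori/python_algebra_practise | 3.py | elements_mul
-- ===== SOURCE A (Python) =====
-- def gcd(a, b):
--     while a != 0 and b != 0:
--         if a > b:
--             a = a % b
--         else:
--             b = b % a
--     return(max(a, b))
--
-- def coprime(a, b):
--     return gcd(a, b) == 1
--
-- def deliteli(n):
--     deliteli = set()
--     k = 2
--     while k**2 <= n:
--         if n%k == 0:
--             deliteli.add(k)
--             deliteli.add(n//k)
--         k += 1
--     return deliteli
--
-- def elements_mul(m):
--     delit = deliteli(m)
--     l =  [i for i in range(1, m)]
--     ans =[]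
--     for i in l:
--         if coprime(m, i):
--             ans.append(i)
--     return ans
-- ===== SOURCE B (Python) =====
-- def elements_mul(m):
--     # Sieve: mark every multiple of each divisor of m, then collect unmarked.
--     marked = set()
--     for d in range(2, m):
--         if m % d == 0:
--             marked.update(range(0, m, d))
--     return [i for i in range(1, m) if i not in marked]
-- ===== Notes on version B (the rewrite author's own statement) =====
-- stated objective: faster
-- what changed: Instead of running the hand-written gcd loop on every candidate below m, B makes one scan for the divisors of m and sieve-marks all multiples of each divisor in a set, then collects the unmarked candidates.
import Mathlib
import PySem

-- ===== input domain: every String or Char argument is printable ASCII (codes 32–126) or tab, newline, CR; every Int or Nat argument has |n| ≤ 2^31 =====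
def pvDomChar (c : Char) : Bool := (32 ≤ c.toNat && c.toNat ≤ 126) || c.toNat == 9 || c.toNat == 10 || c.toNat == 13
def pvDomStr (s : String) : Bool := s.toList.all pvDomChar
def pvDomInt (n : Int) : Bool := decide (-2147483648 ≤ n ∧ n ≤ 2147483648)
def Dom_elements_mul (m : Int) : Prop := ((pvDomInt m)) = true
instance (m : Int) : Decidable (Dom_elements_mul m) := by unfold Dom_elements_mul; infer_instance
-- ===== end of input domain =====

-- B replaces the per-element gcd test by a divisor sieve: mark multiples of every divisor of m, collect the unmarked (faster in a timing run's measurement).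

-- ===== PORT A =====
-- while a != 0 and b != 0: … — ported with fuel a.natAbs+b.natAbs+1, which exceeds the
-- number of iterations whenever the Python loop terminates on the arguments reached here.
def pyGcdLoop : Nat → Int → Int → Int
  | 0, a, b => max a b
  | f + 1, a, b =>
    if a ≠ 0 ∧ b ≠ 0 then
      if a > b then pyGcdLoop f (PySem.Int.mod a b) b
      else pyGcdLoop f a (PySem.Int.mod b a)
    else max a b

def pyGcd (a b : Int) : Int := pyGcdLoop (a.natAbs + b.natAbs + 1) a b

def pyCoprime (a b : Int) : Bool := pyGcd a b == 1

-- while k**2 <= n: … k += 1 — fuel n.natAbs+1 exceeds the iteration count (k starts at 2).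
def deliteliLoop : Nat → Int → Int → PySem.Set Int → PySem.Set Int
  | 0, _, _, s => s
  | f + 1, n, k, s =>
    if k ^ 2 ≤ n then
      let s' := if PySem.Int.mod n k = 0 then
          PySem.Set.add (PySem.Set.add s k) (PySem.Int.floordiv n k)
        else s
      deliteliLoop f n (k + 1) s'
    else s

def deliteli (n : Int) : PySem.Set Int := deliteliLoop (n.natAbs + 1) n 2 PySem.Set.empty

def elements_mul (m : Int) : List Int :=
  let _delit := deliteli m
  let l := PySem.List.pyRange 1 m 1
  let ans : List Int := []
  l.foldl (fun ans i => if pyCoprime m i then ans ++ [i] else ans) ans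

-- ===== PORT B =====
def elements_mul_alt (m : Int) : List Int :=
  let marked : PySem.Set Int :=
    (PySem.List.pyRange 2 m 1).foldl
      (fun marked d =>
        if PySem.Int.mod m d = 0 then PySem.Set.update marked (PySem.List.pyRange 0 m d)
        else marked)
      PySem.Set.empty
  (PySem.List.pyRange 1 m 1).filter (fun i => !(PySem.Set.contains marked i))

-- ===== PRECONDITION & SPEC =====
def Spec_elements_mul (m : Int) (out : List Int) : Prop := out = elements_mul_alt m
instance (m : Int) (out : List Int) : Decidable (Spec_elements_mul m out) := by unfold Spec_elements_mul; infer_instance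

-- ===== CLAIM (what is proved, stated in full; the proofs are below) =====
def Claim_equal_elements_mul : Prop := ∀ (m : Int), Dom_elements_mul m → Spec_elements_mul m (elements_mul m)

-- ===== LEMMAS AND PROOFS =====

-- A's gcd loop computes Int.gcd on nonnegative arguments when given enough fuel.
theorem pyGcdLoop_eq_gcd (f : Nat) (a b : Int) (ha : 0 ≤ a) (hb : 0 ≤ b)
    (hf : a.natAbs + b.natAbs ≤ f) : pyGcdLoop f a b = (Int.gcd a b : Int) := by
  induction f generalizing a b with
  | zero =>
    have ha0 : a = 0 := by omega
    have hb0 : b = 0 := by omega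
    subst ha0 hb0; simp [pyGcdLoop]
  | succ f ih =>
    rw [pyGcdLoop]
    by_cases h : a ≠ 0 ∧ b ≠ 0
    · rw [if_pos h]
      by_cases hab : a > b
      · rw [if_pos hab]
        have hbpos : 0 < b := by omega
        rw [PySem.Int.mod_eq_emod_of_pos hbpos]
        have h1 : 0 ≤ a % b := Int.emod_nonneg a (by omega)
        have h2 : a % b < b := Int.emod_lt_of_pos a hbpos
        rw [ih (a % b) b h1 hb (by omega), Int.gcd_emod a b]
      · rw [if_neg hab]
        have hapos : 0 < a := by omega
        rw [PySem.Int.mod_eq_emod_of_pos hapos]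
        have h1 : 0 ≤ b % a := Int.emod_nonneg b (by omega)
        have h2 : b % a < a := Int.emod_lt_of_pos b hapos
        rw [ih a (b % a) ha h1 (by omega), Int.gcd_comm a (b % a), Int.gcd_emod b a,
          Int.gcd_comm b a]
    · rw [if_neg h]
      rcases not_and_or.mp h with h0 | h0
      · have ha0 : a = 0 := by omega
        subst ha0
        simp [Int.max_eq_right hb, Int.natAbs_of_nonneg hb]
      · have hb0 : b = 0 := by omega
        subst hb0
        simp [Int.max_eq_left ha, Int.natAbs_of_nonneg ha]

theorem pyGcd_eq_gcd (a b : Int) (ha : 0 ≤ a) (hb : 0 ≤ b) :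
    pyGcd a b = (Int.gcd a b : Int) :=
  pyGcdLoop_eq_gcd _ a b ha hb (by omega)

-- membership in B's sieve fold
theorem mem_markFold (m : Int) (ds : List Int) (s : PySem.Set Int) (y : Int) :
    y ∈ ds.foldl
        (fun marked d =>
          if PySem.Int.mod m d = 0 then PySem.Set.update marked (PySem.List.pyRange 0 m d)
          else marked) s
      ↔ y ∈ s ∨ ∃ d ∈ ds, PySem.Int.mod m d = 0 ∧ y ∈ PySem.List.pyRange 0 m d := by
  induction ds generalizing s with
  | nil => simp
  | cons d ds ih =>
    simp only [List.foldl_cons, List.mem_cons]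
    rw [ih]
    split_ifs with hd
    · rw [PySem.Set.mem_update]
      constructor
      · rintro (⟨hy | hy⟩ | ⟨d', hd', h1, h2⟩)
        · exact Or.inl hy
        · exact Or.inr ⟨d, Or.inl rfl, hd, hy⟩
        · exact Or.inr ⟨d', Or.inr hd', h1, h2⟩
      · rintro (hy | ⟨d', (rfl | hd'), h1, h2⟩)
        · exact Or.inl (Or.inl hy)
        · exact Or.inl (Or.inr h2)
        · exact Or.inr ⟨d', hd', h1, h2⟩
    · constructor
      · rintro (hy | ⟨d', hd', h1, h2⟩)
        · exact Or.inl hy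
        · exact Or.inr ⟨d', Or.inr hd', h1, h2⟩
      · rintro (hy | ⟨d', (rfl | hd'), h1, h2⟩)
        · exact Or.inl hy
        · exact absurd h1 hd
        · exact Or.inr ⟨d', hd', h1, h2⟩

-- the arithmetic core: for 1 ≤ i < m, gcd(m,i) = 1 iff no divisor d of m with 2 ≤ d < m divides i
theorem gcd_one_iff_no_divisor (m i : Int) (hi1 : 1 ≤ i) (him : i < m) :
    Int.gcd m i = 1 ↔ ¬ ∃ d, (2 ≤ d ∧ d < m) ∧ d ∣ m ∧ d ∣ i := by
  constructor
  · rintro hg ⟨d, ⟨hd2, _⟩, hdm, hdi⟩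
    have hdn : ((d.toNat : Int)) = d := Int.toNat_of_nonneg (by omega)
    have hdg : d.toNat ∣ Int.gcd m i := Int.dvd_gcd (hdn ▸ hdm) (hdn ▸ hdi)
    rw [hg] at hdg
    have := Nat.le_of_dvd (by norm_num) hdg
    omega
  · intro hno
    by_contra hne
    set g : Nat := Int.gcd m i with hgdef
    have hgm : (g : Int) ∣ m := by rw [hgdef]; exact Int.gcd_dvd_left m i
    have hgi : (g : Int) ∣ i := by rw [hgdef]; exact Int.gcd_dvd_right m i
    have hg0 : g ≠ 0 := by
      intro h0
      have := Int.gcd_eq_zero_iff.mp (hgdef ▸ h0)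
      omega
    have hg2 : 2 ≤ g := by omega
    have hgle : (g : Int) ≤ i := Int.le_of_dvd (by omega) hgi
    exact hno ⟨(g : Int), ⟨by exact_mod_cast hg2, by omega⟩, hgm, hgi⟩

-- ===== VERDICT (by name: the statement is the Claim_ definition above) =====
theorem elements_mul_spec : Claim_equal_elements_mul := by
  intro m _
  unfold Spec_elements_mul elements_mul elements_mul_alt
  rw [PySem.List.foldl_append_if_eq_filter (fun i => pyCoprime m i)]
  simp only [List.nil_append]
  apply List.filter_congr
  intro i hi
  have hib := PySem.List.mem_pyRange_one.mp hi
  have hi1 : 1 ≤ i := hib.1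
  have him : i < m := hib.2
  have hm2 : 2 ≤ m := by omega
  have hgcd : pyGcd m i = (Int.gcd m i : Int) := pyGcd_eq_gcd m i (by omega) (by omega)
  have hmem : (i ∈ (PySem.List.pyRange 2 m 1).foldl
      (fun marked d =>
        if PySem.Int.mod m d = 0 then PySem.Set.update marked (PySem.List.pyRange 0 m d)
        else marked) PySem.Set.empty)
      ↔ ∃ d, (2 ≤ d ∧ d < m) ∧ d ∣ m ∧ d ∣ i := by
    rw [mem_markFold]
    constructor
    · rintro (h | ⟨d, hd, h1, h2⟩)
      · exact absurd h (by simp [PySem.Set.empty])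
      · have hdb := PySem.List.mem_pyRange_one.mp hd
        have hdvd : d ∣ m := (PySem.Int.mod_eq_zero_iff_dvd m d).mp h1
        have h2' := (PySem.List.mem_pyRange_iff_of_pos (by omega : (0:Int) < d) i).mp h2
        exact ⟨d, hdb, hdvd, by simpa using h2'.2.2⟩
    · rintro ⟨d, hd, hdm, hdi⟩
      refine Or.inr ⟨d, PySem.List.mem_pyRange_one.mpr hd, (PySem.Int.mod_eq_zero_iff_dvd m d).mpr hdm, ?_⟩
      exact (PySem.List.mem_pyRange_iff_of_pos (by omega) i).mpr ⟨by omega, him, by simpa using hdi⟩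
  have hiff := gcd_one_iff_no_divisor m i hi1 him
  have hcont := PySem.Set.contains_iff ((PySem.List.pyRange 2 m 1).foldl
      (fun marked d =>
        if PySem.Int.mod m d = 0 then PySem.Set.update marked (PySem.List.pyRange 0 m d)
        else marked) PySem.Set.empty) i
  have key : (Int.gcd m i = 1) ↔ ¬ (PySem.Set.contains ((PySem.List.pyRange 2 m 1).foldl
      (fun marked d =>
        if PySem.Int.mod m d = 0 then PySem.Set.update marked (PySem.List.pyRange 0 m d)
        else marked) PySem.Set.empty) i = true) :=
    hiff.trans (not_congr (hcont.trans hmem)).symm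
  simp only [pyCoprime, hgcd]
  cases hc : PySem.Set.contains ((PySem.List.pyRange 2 m 1).foldl
      (fun marked d =>
        if PySem.Int.mod m d = 0 then PySem.Set.update marked (PySem.List.pyRange 0 m d)
        else marked) PySem.Set.empty) i with
  | false =>
    have hg : Int.gcd m i = 1 := key.mpr (by rw [hc]; simp)
    simp [hg]
  | true =>
    have hg : ¬ Int.gcd m i = 1 := fun h => (key.mp h) hc
    simp [hg]
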